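-- pv_equiv track=rewrite | github.com/pypi-data/pypi-mirror-400 | packages/lsap-sdk/lsap_sdk-0.1.0-py3-none-any.whl/lsap/utils/locate.py | detect_marker
-- ===== SOURCE A (Python) =====
-- from typing import NamedTuple
--
-- class MarkerPosition(NamedTuple):
--     marker: str
--     start_pos: int
--     end_pos: int
--
-- def detect_marker(text: str) -> MarkerPosition | None:
--     """
--     Detect the marker in the text using nested bracket notation.
--
--     Returns tuple of (marker, start_pos, end_pos) or None if no marker found.
--
--     The marker detection uses the following priority:
--     1. <|> (single level)
--     2. <<|>> (double level)
--     3. <<<|>>> (triple level)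
--     ... and so on
--
--     The function selects the marker with the most nesting levels that appears
--     exactly once in the text.
--     """
--     max_level = 10  # reasonable maximum nesting level
--
--     for level in range(1, max_level + 1):
--         marker = "<" * level + "|" + ">" * level
--         count = text.count(marker)
--
--         if count == 1:
--             # Found a unique marker at this level
--             pos = text.find(marker)
--             return MarkerPosition(
--                 marker=marker, start_pos=pos, end_pos=pos + len(marker)
--             )
--         elif count == 0:
--             # This level doesn't exist, try next
--             continue
--         else:
--             # Multiple occurrences, try higher nesting level
--             continue
--
--     return None
-- ===== SOURCE B (Python) =====
-- from typing import NamedTuple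
--
-- class MarkerPosition(NamedTuple):
--     marker: str
--     start_pos: int
--     end_pos: int
--
-- def detect_marker(text: str) -> MarkerPosition | None:
--     """One left-to-right pass collects every marker group: each '|' at position i
--     with p consecutive '<' before and q consecutive '>' after gives a group of
--     depth m = min(p, q) (kept if m > 0, with center i).  A level-L marker occurs
--     exactly at the groups with m >= L, so the lowest level 1..10 with exactly one
--     such group yields the answer."""
--     n = len(text)
--     groups = []  # (depth, center) pairs, centers ascending
--     p = 0  # length of the '<' run ending just before the current position
--     i = 0
--     while i < n:
--         ch = text[i]
--         if ch == '|':
--             q = 0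
--             while i + 1 + q < n and text[i + 1 + q] == '>':
--                 q += 1
--             m = min(p, q)
--             if m > 0:
--                 groups.append((m, i))
--             p = 0
--         elif ch == '<':
--             p += 1
--         else:
--             p = 0
--         i += 1
--     for level in range(1, 11):
--         cands = [g for g in groups if g[0] >= level]
--         if len(cands) == 1:
--             m, c = cands[0]
--             marker = "<" * level + "|" + ">" * level
--             return MarkerPosition(marker=marker, start_pos=c - level, end_pos=c + level + 1)
--     return None
-- ===== Notes on version B (the rewrite author's own statement) =====
-- stated objective: alternative
-- what changed: Instead of searching the text once per nesting level with str.count/str.find, B makes a single left-to-right pass collecting every '|' together with the depth min(run of '<' before, run of '>' after), then reads each level's occurrence count and position off that group list.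
import Mathlib
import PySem

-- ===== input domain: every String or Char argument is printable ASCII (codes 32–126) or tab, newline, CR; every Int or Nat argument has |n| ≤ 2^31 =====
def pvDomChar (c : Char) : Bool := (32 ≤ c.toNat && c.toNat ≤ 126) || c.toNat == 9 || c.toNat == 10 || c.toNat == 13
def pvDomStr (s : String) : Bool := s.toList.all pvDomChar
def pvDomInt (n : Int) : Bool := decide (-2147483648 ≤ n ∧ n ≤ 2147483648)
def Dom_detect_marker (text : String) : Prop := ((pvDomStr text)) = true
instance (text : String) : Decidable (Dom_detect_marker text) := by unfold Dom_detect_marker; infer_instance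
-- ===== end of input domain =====

-- B replaces A's per-level str.count/str.find searches by a single left-to-right scan that
-- collects every '|' with its surrounding bracket-run depth (objective: alternative algorithm).

-- ===== PORT A =====
-- Python string building "<"*level + "|" + ">"*level is ported on the char list
-- (repetition = List.replicate, concatenation = ++ ; exact for these ASCII strings).
def pvALoop (text : String) : List Int → Option (String × Int × Int)
  | [] => none                                     -- loop fell through: return None
  | level :: rest =>
    let marker := String.ofList (List.replicate level.toNat '<' ++ '|' :: List.replicate level.toNat '>')
    let count := PySem.Str.count text marker       -- text.count(marker)
    if count = 1 then
      let pos := PySem.Str.find text marker        -- text.find(marker)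
      some (marker, pos, pos + PySem.Str.len marker)
    else
      pvALoop text rest                            -- count == 0 or count > 1: continue

def detect_marker (text : String) : Option (String × Int × Int) :=
  pvALoop text (PySem.List.pyRange 1 11 1)         -- for level in range(1, max_level + 1)

-- ===== PORT B =====
-- inner while loop of Source B: length of the leading run of '>'
def pvLeadGt : List Char → Nat
  | [] => 0
  | c :: t => if c = '>' then pvLeadGt t + 1 else 0

-- main while loop of Source B: i = absolute index of the current char, p = length of the
-- '<' run ending just before it, groups = accumulator (Source B appends to a list)
def pvScan : List Char → Nat → Nat → List (Nat × Nat) → List (Nat × Nat)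
  | [], _, _, groups => groups
  | c :: t, i, p, groups =>
    if c = '|' then
      let q := pvLeadGt t
      let m := min p q
      pvScan t (i + 1) 0 (if 0 < m then groups ++ [(m, i)] else groups)
    else if c = '<' then
      pvScan t (i + 1) (p + 1) groups
    else
      pvScan t (i + 1) 0 groups

-- for level in range(1, 11): the singleton match is Source B's "len(cands) == 1" + unpacking
def pvBLoop (groups : List (Nat × Nat)) : List Int → Option (String × Int × Int)
  | [] => none
  | level :: rest =>
    match groups.filter (fun g => level ≤ (g.1 : Int)) with
    | [g] =>
      let marker := String.ofList (List.replicate level.toNat '<' ++ '|' :: List.replicate level.toNat '>')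
      some (marker, (g.2 : Int) - level, (g.2 : Int) + level + 1)
    | _ => pvBLoop groups rest

def detect_marker_alt (text : String) : Option (String × Int × Int) :=
  pvBLoop (pvScan text.toList 0 0 []) (PySem.List.pyRange 1 11 1)

-- ===== PRECONDITION & SPEC =====
def Spec_detect_marker (text : String) (out : Option (String × Int × Int)) : Prop := out = detect_marker_alt text
instance (text : String) (out : Option (String × Int × Int)) : Decidable (Spec_detect_marker text out) := by unfold Spec_detect_marker; infer_instance

-- ===== CLAIM (what is proved, stated in full; the proofs are below) =====
def Claim_equal_detect_marker : Prop := ∀ (text : String), Dom_detect_marker text → Spec_detect_marker text (detect_marker text)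

-- ===== LEMMAS AND PROOFS =====

-- the level-L marker "<"*L + "|" + ">"*L as a char list
def pvMarker (L : Nat) : List Char := List.replicate L '<' ++ '|' :: List.replicate L '>'

-- length of the leading run of '<'
def pvLeadLt : List Char → Nat
  | [] => 0
  | c :: t => if c = '<' then pvLeadLt t + 1 else 0

-- the '<' run ending just before position k of t, where p is the run carried in from
-- the left of t (Source B's loop state); if the whole prefix t[0:k] is '<' the carried run extends it
def pvPrun (t : List Char) (k p : Nat) : Nat :=
  let r := pvLeadLt ((t.take k).reverse)
  if r = k then p + r else r

-- depth of the group centered at i (with carried run p = 0, i.e. for the whole string)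
def pvM (cs : List Char) (i : Nat) : Nat :=
  min (pvPrun cs i 0) (pvLeadGt (cs.drop (i + 1)))

lemma pvLeadLt_le_length (t : List Char) : pvLeadLt t ≤ t.length := by
  induction t with
  | nil => simp [pvLeadLt]
  | cons c t ih => by_cases h : c = '<' <;> simp [pvLeadLt, h] <;> omega

-- leading-run counters read as replicate-prefixes
lemma le_pvLeadGt_iff (t : List Char) (L : Nat) :
    L ≤ pvLeadGt t ↔ List.replicate L '>' <+: t := by
  induction t generalizing L with
  | nil =>
    cases L with
    | zero => simp [pvLeadGt]
    | succ L => simp [pvLeadGt, List.replicate_succ]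
  | cons c t ih =>
    cases L with
    | zero => simp
    | succ L =>
      by_cases h : c = '>'
      · subst h
        have e : pvLeadGt ('>' :: t) = pvLeadGt t + 1 := by simp [pvLeadGt]
        rw [e, List.replicate_succ, List.cons_prefix_cons]
        constructor
        · intro hle; exact ⟨rfl, (ih L).1 (by omega)⟩
        · rintro ⟨-, hp⟩; have := (ih L).2 hp; omega
      · simp [pvLeadGt, h, List.replicate_succ, List.cons_prefix_cons, Ne.symm h]

lemma le_pvLeadLt_iff (t : List Char) (L : Nat) :
    L ≤ pvLeadLt t ↔ List.replicate L '<' <+: t := by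
  induction t generalizing L with
  | nil =>
    cases L with
    | zero => simp [pvLeadLt]
    | succ L => simp [pvLeadLt, List.replicate_succ]
  | cons c t ih =>
    cases L with
    | zero => simp
    | succ L =>
      by_cases h : c = '<'
      · subst h
        have e : pvLeadLt ('<' :: t) = pvLeadLt t + 1 := by simp [pvLeadLt]
        rw [e, List.replicate_succ, List.cons_prefix_cons]
        constructor
        · intro hle; exact ⟨rfl, (ih L).1 (by omega)⟩
        · rintro ⟨-, hp⟩; have := (ih L).2 hp; omega
      · simp [pvLeadLt, h, List.replicate_succ, List.cons_prefix_cons, Ne.symm h]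

-- splitting a prefix of an append
lemma append_prefix_iff (a b t : List Char) :
    a ++ b <+: t ↔ a <+: t ∧ b <+: t.drop a.length := by
  constructor
  · intro h
    rcases h with ⟨r, hr⟩
    constructor
    · exact ⟨b ++ r, by simp [← hr]⟩
    · refine ⟨r, ?_⟩
      rw [← hr, List.drop_append_of_le_length (by simp)]
      simp
  · rintro ⟨⟨r, hr⟩, ⟨r2, hr2⟩⟩
    refine ⟨r2, ?_⟩
    have : t = a ++ t.drop a.length := by
      conv_lhs => rw [← hr]
      rw [← hr, List.drop_append_of_le_length (by simp)]
      simp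
    rw [List.append_assoc, hr2, ← this]

lemma cons_prefix_iff' (x : Char) (b u : List Char) :
    x :: b <+: u ↔ u[0]? = some x ∧ b <+: u.drop 1 := by
  rw [List.cons_prefix_iff]
  constructor
  · rintro ⟨l', rfl, hb⟩; simp [hb]
  · rintro ⟨h0, hb⟩
    cases u with
    | nil => simp at h0
    | cons c u' =>
      simp at h0
      exact ⟨u', by simp [h0], by simpa using hb⟩

lemma pvPrun_zero (cs : List Char) (i : Nat) :
    pvPrun cs i 0 = pvLeadLt ((cs.take i).reverse) := by
  by_cases h : pvLeadLt ((cs.take i).reverse) = i <;> simp [pvPrun, h]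

lemma occ_iff_center (cs : List Char) (L j : Nat) (hL : 1 ≤ L) :
    pvMarker L <+: cs.drop j ↔ (cs[j + L]? = some '|' ∧ L ≤ pvM cs (j + L)) := by
  by_cases hn : j + L < cs.length
  · have hdl : ((cs.drop j).drop (List.replicate L '<').length) = cs.drop (j + L) := by
      simp [List.drop_drop]
    rw [pvMarker, append_prefix_iff, hdl, cons_prefix_iff']
    have h0 : (cs.drop (j + L))[0]? = cs[j + L]? := by
      rw [List.getElem?_drop]; congr 1
    have hdd : (cs.drop (j + L)).drop 1 = cs.drop (j + L + 1) := by
      rw [List.drop_drop]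
    rw [h0, hdd]
    unfold pvM
    rw [pvPrun_zero]
    have hgt : L ≤ pvLeadGt (cs.drop (j + L + 1)) ↔ List.replicate L '>' <+: cs.drop (j + L + 1) :=
      le_pvLeadGt_iff _ _
    have htk : (cs.take (j + L)).length = j + L := by rw [List.length_take]; omega
    have hkey : (List.replicate L '<' <:+ cs.take (j + L)) ↔ (List.replicate L '<' <+: cs.drop j) := by
      rw [List.suffix_iff_eq_drop, htk, List.length_replicate,
          List.prefix_iff_eq_take, List.length_replicate,
          show j + L - L = j from by omega, List.drop_take,
          show j + L - j = L from by omega]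
    have hlt : L ≤ pvLeadLt ((cs.take (j + L)).reverse) ↔ List.replicate L '<' <+: cs.drop j := by
      rw [le_pvLeadLt_iff]
      rw [show (List.replicate L '<' <+: (cs.take (j + L)).reverse) ↔
            ((List.replicate L '<').reverse <+: (cs.take (j + L)).reverse) from by
            rw [List.reverse_replicate],
          List.reverse_prefix]
      exact hkey
    constructor
    · rintro ⟨ha, hb, hc⟩
      exact ⟨hb, by rw [le_min_iff]; exact ⟨hlt.mpr ha, hgt.mpr hc⟩⟩
    · rintro ⟨hb, hm⟩
      rw [le_min_iff] at hm
      exact ⟨hlt.mp hm.1, hb, hgt.mp hm.2⟩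
  · constructor
    · intro h
      have hlen := h.length_le
      simp only [pvMarker, List.length_append, List.length_cons, List.length_replicate,
        List.length_drop] at hlen
      exact (hn (by omega)).elim
    · rintro ⟨h, -⟩
      obtain ⟨hlt2, -⟩ := List.getElem?_eq_some_iff.mp h
      exact (hn hlt2).elim

lemma pvLeadLt_append_singleton (xs : List Char) (c : Char) :
    pvLeadLt (xs ++ [c]) =
      if pvLeadLt xs = xs.length then pvLeadLt xs + (if c = '<' then 1 else 0)
      else pvLeadLt xs := by
  induction xs with
  | nil => by_cases h : c = '<' <;> simp [pvLeadLt, h]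
  | cons x xs ih =>
    by_cases hx : x = '<'
    · subst hx
      have e1 : pvLeadLt (('<' :: xs) ++ [c]) = pvLeadLt (xs ++ [c]) + 1 := by simp [pvLeadLt]
      have e2 : pvLeadLt ('<' :: xs) = pvLeadLt xs + 1 := by simp [pvLeadLt]
      have hle := pvLeadLt_le_length xs
      rw [e1, e2, ih, List.length_cons]
      by_cases h2 : pvLeadLt xs = xs.length <;> by_cases hc : c = '<' <;>
        simp [h2, hc] <;> try omega
    · have e1 : pvLeadLt ((x :: xs) ++ [c]) = 0 := by simp [pvLeadLt, hx]
      have e2 : pvLeadLt (x :: xs) = 0 := by simp [pvLeadLt, hx]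
      rw [e1, e2]
      simp

lemma pvPrun_cons (c : Char) (t : List Char) (k p : Nat) (hk : k ≤ t.length) :
    pvPrun (c :: t) (k + 1) p = pvPrun t k (if c = '<' then p + 1 else 0) := by
  have hrev : ((c :: t).take (k + 1)).reverse = (t.take k).reverse ++ [c] := by
    rw [show (c :: t).take (k + 1) = c :: t.take k from rfl, List.reverse_cons]
  have hlen : ((t.take k).reverse).length = k := by simp [hk]
  have hrle : pvLeadLt ((t.take k).reverse) ≤ k := by
    have h := pvLeadLt_le_length ((t.take k).reverse); rw [hlen] at h; exact h
  unfold pvPrun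
  rw [hrev, pvLeadLt_append_singleton, hlen]
  by_cases hc : c = '<' <;> by_cases h2 : pvLeadLt ((t.take k).reverse) = k <;>
    simp [hc, h2] <;> omega

lemma pvScan_spec (t : List Char) : ∀ (i p : Nat) (acc : List (Nat × Nat)),
    pvScan t i p acc = acc ++ (List.range t.length).filterMap (fun k =>
      let m := min (pvPrun t k p) (pvLeadGt (t.drop (k + 1)))
      if t[k]? = some '|' ∧ 0 < m then some (m, i + k) else none) := by
  induction t with
  | nil => intro i p acc; simp [pvScan]
  | cons c t ih =>
    intro i p acc
    have hrange : List.range (t.length + 1) = 0 :: (List.range t.length).map Nat.succ :=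
      List.range_succ_eq_map
    have hp0 : pvPrun (c :: t) 0 p = p := by simp [pvPrun, pvLeadLt]
    rw [List.length_cons, hrange]
    rw [List.filterMap_cons, List.filterMap_map]
    have htail : ∀ q', q' = (if c = '<' then p + 1 else 0) →
        List.filterMap ((fun k =>
            let m := min (pvPrun (c :: t) k p) (pvLeadGt ((c :: t).drop (k + 1)))
            if (c :: t)[k]? = some '|' ∧ 0 < m then some (m, i + k) else none) ∘ Nat.succ)
          (List.range t.length)
        = List.filterMap (fun k =>
            let m := min (pvPrun t k q') (pvLeadGt (t.drop (k + 1)))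
            if t[k]? = some '|' ∧ 0 < m then some (m, (i + 1) + k) else none)
          (List.range t.length) := by
      intro q' hq'
      apply List.filterMap_congr
      intro k hk
      have hklt : k < t.length := List.mem_range.mp hk
      simp only [Function.comp]
      rw [show Nat.succ k = k + 1 from rfl, pvPrun_cons c t k p (by omega), ← hq']
      rw [show (c :: t).drop (k + 1 + 1) = t.drop (k + 1) from rfl]
      rw [show (c :: t)[k + 1]? = t[k]? by simp]
      rw [show i + (k + 1) = (i + 1) + k from by omega]
    by_cases hc : c = '|'
    · subst hc
      have hL : pvScan ('|' :: t) i p acc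
          = pvScan t (i + 1) 0
              (if 0 < min p (pvLeadGt t) then acc ++ [(min p (pvLeadGt t), i)] else acc) := by
        simp [pvScan]
      have hhead : (let m := min (pvPrun ('|' :: t) 0 p) (pvLeadGt (('|' :: t).drop (0 + 1)))
          if ('|' :: t)[0]? = some '|' ∧ 0 < m then some (m, i + 0) else none)
          = (if 0 < min p (pvLeadGt t) then some (min p (pvLeadGt t), i) else none) := by
        simp only [hp0, List.getElem?_cons_zero, List.drop_succ_cons, List.drop_zero, true_and]
        simp
      rw [hL, ih, htail 0 (by simp), hhead]
      by_cases hm : 0 < min p (pvLeadGt t) <;> simp [hm]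
    · have hhead : (let m := min (pvPrun (c :: t) 0 p) (pvLeadGt ((c :: t).drop (0 + 1)))
          if (c :: t)[0]? = some '|' ∧ 0 < m then some (m, i + 0) else none) = none := by
        simp [hc]
      by_cases hc2 : c = '<'
      · have hL : pvScan (c :: t) i p acc = pvScan t (i + 1) (p + 1) acc := by
          simp [pvScan, hc, hc2]
        rw [hL, ih, htail (p + 1) (by simp [hc2]), hhead]
      · have hL : pvScan (c :: t) i p acc = pvScan t (i + 1) 0 acc := by
          simp [pvScan, hc, hc2]
        rw [hL, ih, htail 0 (by simp [hc2]), hhead]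

lemma pvMarker_length' (L : Nat) : (pvMarker L).length = 2 * L + 1 := by
  simp [pvMarker]; omega

lemma marker_getElem? (L k : Nat) (hk : k < 2 * L + 1) :
    (pvMarker L)[k]? = some (if k < L then '<' else if k = L then '|' else '>') := by
  unfold pvMarker
  rcases Nat.lt_trichotomy k L with h | h | h
  · rw [List.getElem?_append_left (by simp; omega)]
    simp [h]
  · subst h
    rw [List.getElem?_append_right (by simp)]
    simp
  · rw [List.getElem?_append_right (by simp; omega)]
    rw [show k - (List.replicate L '<').length = (k - L - 1) + 1 from by simp; omega]
    simp only [List.getElem?_cons_succ, List.getElem?_replicate]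
    have h1 : ¬ k < L := by omega
    have h2 : ¬ k = L := by omega
    simp [h1, h2, show k - L - 1 < L from by omega]

lemma occ_char (cs : List Char) (L j : Nat) (h : pvMarker L <+: cs.drop j)
    (k : Nat) (hk : k < 2 * L + 1) :
    cs[j + k]? = some (if k < L then '<' else if k = L then '|' else '>') := by
  have hpm : k < (pvMarker L).length := by rw [pvMarker_length']; omega
  have hpre := List.prefix_iff_getElem?.mp h k hpm
  rw [List.getElem?_drop] at hpre
  rw [hpre]
  have hm := marker_getElem? L k hk
  rw [List.getElem?_eq_getElem hpm] at hm
  exact hm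

lemma marker_no_overlap (L : Nat) (hL : 1 ≤ L) (l : List Char) (j j' : Nat)
    (h1 : pvMarker L <+: l.drop j) (h2 : pvMarker L <+: l.drop j') (hlt : j < j') :
    j + (pvMarker L).length ≤ j' := by
  rw [pvMarker_length']
  by_contra hcon
  rw [Nat.not_le] at hcon
  by_cases hle : j' ≤ j + L
  · have o := j + L - j'
    have e1 := occ_char l L j h1 L (by omega)
    have e2 := occ_char l L j' h2 (j + L - j') (by omega)
    rw [show j' + (j + L - j') = j + L from by omega] at e2
    rw [e1] at e2
    have hcl : (j + L - j') < L := by omega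
    simp [hcl] at e2
  · have e1 := occ_char l L j h1 (j' - j) (by omega)
    have e2 := occ_char l L j' h2 0 (by omega)
    rw [show j' + 0 = j' from by omega, show j + (j' - j) = j' from by omega] at *
    rw [e1] at e2
    have ha : ¬ (j' - j) < L := by omega
    have hb : ¬ (j' - j) = L := by omega
    have h0 : 0 < L := by omega
    simp [ha, hb, h0] at e2

lemma count_go_spec (sub : List Char) (hne : sub ≠ []) :
    ∀ (fuel : Nat) (l : List Char) (acc : Nat), l.length ≤ fuel →
    (∀ j j', sub <+: l.drop j → sub <+: l.drop j' → j < j' → j + sub.length ≤ j') →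
    PySem.Chars.count.go sub fuel l acc
      = acc + ((List.range l.length).filter (fun j => decide (sub <+: l.drop j))).length := by
  intro fuel
  induction fuel with
  | zero =>
    intro l acc hlen hno
    have : l = [] := List.length_eq_zero_iff.mp (by omega)
    subst this
    simp [PySem.Chars.count.go]
  | succ fuel ih =>
    intro l acc hlen hno
    cases l with
    | nil => simp [PySem.Chars.count.go]
    | cons c t =>
      have hstep : PySem.Chars.count.go sub (fuel + 1) (c :: t) acc =
          (if sub.isPrefixOf (c :: t) then
            PySem.Chars.count.go sub fuel (List.drop sub.length (c :: t)) (acc + 1)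
          else PySem.Chars.count.go sub fuel t acc) := by
        simp [PySem.Chars.count.go]
      rw [hstep]
      by_cases hp : sub <+: (c :: t)
      · rw [if_pos (List.isPrefixOf_iff_prefix.mpr hp)]
        set k := sub.length with hk
        have hk1 : 1 ≤ k := by cases sub <;> simp_all
        have hkle : k ≤ t.length + 1 := by
          have := hp.length_le; simpa using this
        have hdno : ∀ j j', sub <+: (List.drop k (c :: t)).drop j →
            sub <+: (List.drop k (c :: t)).drop j' → j < j' → j + sub.length ≤ j' := by
          intro j j' ha hb hlt
          rw [List.drop_drop] at ha hb
          have := hno (k + j) (k + j') ha hb (by omega)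
          omega
        have hlen' : t.length + 1 ≤ fuel + 1 := by simpa using hlen
        rw [ih (List.drop k (c :: t)) (acc + 1) (by simp; omega) hdno]
        have hsplit : List.range (c :: t).length
            = List.range k ++ (List.range ((c :: t).length - k)).map (k + ·) := by
          rw [← List.range_add]
          congr 1
          simp; omega
        rw [hsplit, List.filter_append, List.length_append]
        have hfirst : ((List.range k).filter (fun j => decide (sub <+: (c :: t).drop j))).length = 1 := by
          obtain ⟨k', hkk⟩ : ∃ k', k = k' + 1 := ⟨k - 1, by omega⟩
          rw [hkk, List.range_succ_eq_map, List.filter_cons]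
          rw [if_pos (by simpa using hp)]
          have hnil : ((List.range k').map Nat.succ).filter
              (fun j => decide (sub <+: (c :: t).drop j)) = [] := by
            rw [List.filter_eq_nil_iff]
            intro j hj
            simp only [List.mem_map, List.mem_range] at hj
            obtain ⟨j', hj', rfl⟩ := hj
            simp only [decide_eq_true_eq]
            intro hocc
            have := hno 0 (j' + 1) (by simpa using hp) hocc (by omega)
            omega
          rw [hnil]
          simp
        rw [hfirst]
        have hsecond : (((List.range ((c :: t).length - k)).map (k + ·)).filter
              (fun j => decide (sub <+: (c :: t).drop j))).length
            = ((List.range (List.drop k (c :: t)).length).filter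
              (fun j => decide (sub <+: (List.drop k (c :: t)).drop j))).length := by
          rw [List.filter_map, List.length_map,
              show (List.drop k (c :: t)).length = (c :: t).length - k from by simp]
          apply congrArg
          apply List.filter_congr
          intro j hj
          simp [Function.comp, List.drop_drop, Nat.add_comm]
        rw [hsecond]
        omega
      · rw [if_neg (by simpa [List.isPrefixOf_iff_prefix] using hp)]
        have htno : ∀ j j', sub <+: t.drop j → sub <+: t.drop j' → j < j' → j + sub.length ≤ j' := by
          intro j j' ha hb hlt
          have := hno (j + 1) (j' + 1) (by simpa using ha) (by simpa using hb) (by omega)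
          omega
        rw [ih t acc (by simpa using hlen) htno]
        have htail : ((List.range (c :: t).length).filter
              (fun j => decide (sub <+: (c :: t).drop j))).length
            = ((List.range t.length).filter (fun j => decide (sub <+: t.drop j))).length := by
          rw [List.length_cons, List.range_succ_eq_map, List.filter_cons]
          rw [if_neg (by simpa using hp)]
          rw [List.filter_map, List.length_map]
          apply congrArg
          apply List.filter_congr
          intro j hj
          simp [Function.comp]
        rw [htail]

lemma chars_count_marker (cs : List Char) (L : Nat) (hL : 1 ≤ L) :
    PySem.Chars.count cs (pvMarker L)
      = ((List.range cs.length).filter (fun j => decide (pvMarker L <+: cs.drop j))).length := by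
  have hne : pvMarker L ≠ [] := by simp [pvMarker]
  unfold PySem.Chars.count
  rw [if_neg (by simp [pvMarker])]
  have := count_go_spec (pvMarker L) hne cs.length cs 0 le_rfl
    (fun j j' h1 h2 hlt => marker_no_overlap L hL cs j j' h1 h2 hlt)
  omega

def pvG (cs : List Char) (L : Nat) : Nat → Option Nat := fun i =>
  if cs[i]? = some '|' ∧ L ≤ pvM cs i then some (i - L) else none

lemma pvPrun_le (cs : List Char) (i : Nat) : pvPrun cs i 0 ≤ i := by
  rw [pvPrun_zero]
  have h := pvLeadLt_le_length ((cs.take i).reverse)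
  simp at h
  omega

lemma occ_filter_shift (cs : List Char) (L : Nat) (hL : 1 ≤ L) : ∀ (m : Nat),
    (List.range m).filter (fun j => decide (pvMarker L <+: cs.drop j))
      = (List.range (m + L)).filterMap (pvG cs L) := by
  intro m
  induction m with
  | zero =>
    rw [List.range_zero, List.filter_nil]
    symm
    rw [List.filterMap_eq_nil_iff]
    intro i hi
    have hiL : i < L := by simpa using hi
    unfold pvG
    rw [if_neg]
    rintro ⟨-, hm⟩
    unfold pvM at hm
    have := pvPrun_le cs i
    omega
  | succ m ih =>
    rw [show m + 1 + L = (m + L) + 1 from by omega, List.range_succ, List.range_succ,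
        List.filter_append, List.filterMap_append, ih]
    congr 1
    have hocc := occ_iff_center cs L m hL
    by_cases h : pvMarker L <+: cs.drop m
    · rw [List.filter_cons, if_pos (by simpa using h)]
      unfold pvG
      rw [List.filterMap_cons]
      rw [if_pos (by rw [← occ_iff_center cs L m hL]; exact h)]
      simp
    · rw [List.filter_cons, if_neg (by simpa using h)]
      unfold pvG
      rw [List.filterMap_cons, if_neg (by rw [← occ_iff_center cs L m hL]; exact h)]
      simp

lemma occ_filter_eq' (cs : List Char) (L : Nat) (hL : 1 ≤ L) :
    (List.range cs.length).filter (fun j => decide (pvMarker L <+: cs.drop j))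
      = (List.range cs.length).filterMap (pvG cs L) := by
  rw [occ_filter_shift cs L hL cs.length, List.range_add, List.filterMap_append]
  have : (List.map (fun x => cs.length + x) (List.range L)).filterMap (pvG cs L) = [] := by
    rw [List.filterMap_eq_nil_iff]
    intro i hi
    simp only [List.mem_map] at hi
    obtain ⟨x, -, rfl⟩ := hi
    unfold pvG
    rw [if_neg]
    rintro ⟨hc, -⟩
    rw [List.getElem?_eq_none_iff.mpr (by omega)] at hc
    simp at hc
  rw [this, List.append_nil]

lemma scan_closed (cs : List Char) :
    pvScan cs 0 0 [] = (List.range cs.length).filterMap (fun k =>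
      if cs[k]? = some '|' ∧ 0 < pvM cs k then some (pvM cs k, k) else none) := by
  rw [pvScan_spec cs 0 0 []]
  rw [List.nil_append]
  apply List.filterMap_congr
  intro k hk
  unfold pvM
  simp

lemma cands_eq (cs : List Char) (L : Nat) (hL : 1 ≤ L) :
    ((pvScan cs 0 0 []).filter (fun g => L ≤ g.1)).map (fun g => g.2 - L)
      = (List.range cs.length).filterMap (pvG cs L) := by
  rw [scan_closed, List.filter_filterMap, List.map_filterMap]
  apply List.filterMap_congr
  intro k hk
  by_cases h1 : cs[k]? = some '|'
  · by_cases h2 : L ≤ pvM cs k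
    · have h0 : 0 < pvM cs k := by omega
      simp [h1, h2, h0, pvG, Option.filter]
    · by_cases h0 : 0 < pvM cs k <;> simp [h1, h2, h0, pvG, Option.filter]
  · simp [h1, pvG]

lemma level_bridge (cs : List Char) (L : Nat) (hL : 1 ≤ L) :
    PySem.Chars.count cs (pvMarker L)
        = (((pvScan cs 0 0 []).filter (fun g => decide ((L : Int) ≤ (g.1 : Int)))).length)
    ∧ ∀ g, ((pvScan cs 0 0 []).filter (fun g' => decide ((L : Int) ≤ (g'.1 : Int)))) = [g] →
        L ≤ g.2 ∧ PySem.Chars.find cs (pvMarker L) = ((g.2 : Int) - (L : Int)) := by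
  have hpred : (pvScan cs 0 0 []).filter (fun g => decide ((L : Int) ≤ (g.1 : Int)))
      = (pvScan cs 0 0 []).filter (fun g => decide (L ≤ g.1)) := by
    apply List.filter_congr
    intro g hg
    simp
  have hlen : PySem.Chars.count cs (pvMarker L)
      = ((pvScan cs 0 0 []).filter (fun g => decide (L ≤ g.1))).length := by
    rw [chars_count_marker cs L hL, occ_filter_eq' cs L hL, ← cands_eq cs L hL,
      List.length_map]
  constructor
  · rw [hpred]; exact hlen
  · intro g hg
    rw [hpred] at hg
    have hmem : g ∈ (pvScan cs 0 0 []).filter (fun g => decide (L ≤ g.1)) := by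
      rw [hg]; exact List.mem_singleton.mpr rfl
    have hmem2 := List.mem_filter.mp hmem
    have hLg1 : L ≤ g.1 := by simpa using hmem2.2
    have hLg2 : L ≤ g.2 := by
      have hscan := hmem2.1
      rw [scan_closed] at hscan
      obtain ⟨k, -, hfk⟩ := List.mem_filterMap.mp hscan
      by_cases hcond : cs[k]? = some '|' ∧ 0 < pvM cs k
      · rw [if_pos hcond] at hfk
        have hgk : g = (pvM cs k, k) := by exact (Option.some.injEq _ _).mp hfk.symm
        have := pvPrun_le cs k
        have hM : pvM cs k ≤ pvPrun cs k 0 := Nat.min_le_left _ _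
        rw [hgk]
        simp only []
        have : L ≤ pvM cs k := by rw [hgk] at hLg1; exact hLg1
        omega
      · rw [if_neg hcond] at hfk
        exact absurd hfk (by simp)
    refine ⟨hLg2, ?_⟩
    have hoccl : (List.range cs.length).filter (fun j => decide (pvMarker L <+: cs.drop j))
        = [g.2 - L] := by
      rw [occ_filter_eq' cs L hL, ← cands_eq cs L hL, hg]
      simp
    have hocc : pvMarker L <+: cs.drop (g.2 - L) := by
      have : g.2 - L ∈ (List.range cs.length).filter
          (fun j => decide (pvMarker L <+: cs.drop j)) := by
        rw [hoccl]; exact List.mem_singleton.mpr rfl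
      simpa using (List.mem_filter.mp this).2
    have hinf : pvMarker L <:+: cs := by
      have hex : ∃ j, pvMarker L <+: cs.drop j := ⟨g.2 - L, hocc⟩
      rw [PySem.Chars.exists_prefix_drop_iff_isIn] at hex
      exact (PySem.Chars.isIn_iff_infix _ _).mp hex
    have hnn : 0 ≤ PySem.Chars.find cs (pvMarker L) :=
      (PySem.Chars.find_nonneg_iff cs (pvMarker L)).mpr hinf
    obtain ⟨hoccf, -⟩ := PySem.Chars.find_spec hnn
    have hflt : (PySem.Chars.find cs (pvMarker L)).toNat < cs.length := by
      have h1 := hoccf.length_le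
      rw [pvMarker_length', List.length_drop] at h1
      omega
    have hfmem : (PySem.Chars.find cs (pvMarker L)).toNat ∈
        (List.range cs.length).filter (fun j => decide (pvMarker L <+: cs.drop j)) :=
      List.mem_filter.mpr ⟨List.mem_range.mpr hflt, by simpa using hoccf⟩
    rw [hoccl] at hfmem
    have hfeq : (PySem.Chars.find cs (pvMarker L)).toNat = g.2 - L :=
      List.mem_singleton.mp hfmem
    have : PySem.Chars.find cs (pvMarker L) = ((g.2 - L : Nat) : Int) := by
      rw [← hfeq]; exact (Int.toNat_of_nonneg hnn).symm
    rw [this]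
    omega

lemma loop_eq (text : String) (levels : List Int) (h : ∀ l ∈ levels, 1 ≤ l) :
    pvALoop text levels = pvBLoop (pvScan text.toList 0 0 []) levels := by
  induction levels with
  | nil => simp [pvALoop, pvBLoop]
  | cons level rest ih =>
    have h1 : 1 ≤ level := h level List.mem_cons_self
    have ih' := ih (fun l hl => h l (List.mem_cons_of_mem _ hl))
    set L := level.toNat with hLdef
    have hcast : (L : Int) = level := by omega
    have hL : 1 ≤ L := by omega
    have hmark : (String.ofList (List.replicate level.toNat '<' ++ '|' ::
        List.replicate level.toNat '>')).toList = pvMarker L := by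
      simp [pvMarker, hLdef]
    obtain ⟨hcount, hfind⟩ := level_bridge text.toList L hL
    have hcnt : PySem.Str.count text (String.ofList (List.replicate level.toNat '<' ++ '|' ::
        List.replicate level.toNat '>')) = PySem.Chars.count text.toList (pvMarker L) := by
      rw [PySem.Str.count_eq, hmark]
    have hpredeq : (fun g : Nat × Nat => decide (level ≤ (g.1 : Int)))
        = (fun g : Nat × Nat => decide ((L : Int) ≤ (g.1 : Int))) := by
      funext g; rw [hcast]
    rcases hfc : (pvScan text.toList 0 0 []).filter
        (fun g => decide ((L : Int) ≤ (g.1 : Int))) with - | ⟨g, rest2⟩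
    · -- no candidate: count = 0
      have hc0 : PySem.Chars.count text.toList (pvMarker L) = 0 := by
        rw [hcount, hfc]; rfl
      simp only [pvALoop, pvBLoop, hcnt, hc0, hpredeq, hfc]
      simpa using ih'
    · rcases rest2 with - | ⟨g2, rest3⟩
      · -- unique candidate
        have hc1 : PySem.Chars.count text.toList (pvMarker L) = 1 := by
          rw [hcount, hfc]; rfl
        obtain ⟨hLg2, hfeq⟩ := hfind g hfc
        have hfnd : PySem.Str.find text (String.ofList (List.replicate level.toNat '<' ++ '|' ::
            List.replicate level.toNat '>')) = ((g.2 : Int) - (L : Int)) := by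
          rw [PySem.Str.find_eq, hmark, hfeq]
        have hlen : PySem.Str.len (String.ofList (List.replicate level.toNat '<' ++ '|' ::
            List.replicate level.toNat '>')) = 2 * (L : Int) + 1 := by
          rw [PySem.Str.len_eq, hmark, pvMarker_length']
          push_cast
          ring
        simp only [pvALoop, pvBLoop, hcnt, hc1, hpredeq, hfc, if_pos, hfnd, hlen]
        rw [← hcast]
        rw [show ((g.2 : Int) - (L : Int) + (2 * (L : Int) + 1)) = (g.2 : Int) + (L : Int) + 1 from by ring]
      · -- more than one candidate: count ≥ 2
        have hc2 : PySem.Chars.count text.toList (pvMarker L) = rest3.length + 2 := by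
          rw [hcount, hfc]; simp
        simp only [pvALoop, pvBLoop, hcnt, hc2, hpredeq, hfc]
        have : ¬ (rest3.length + 2 = 1) := by omega
        simp only [this, if_false]
        simpa using ih'

-- ===== VERDICT (by name: the statement is the Claim_ definition above) =====
theorem detect_marker_spec : Claim_equal_detect_marker := by
  intro text _
  unfold Spec_detect_marker detect_marker detect_marker_alt
  exact loop_eq text (PySem.List.pyRange 1 11 1) (by decide)
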